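-- pv_equiv track=rewrite | github.com/nadeemlab/DeepLIIF | deepliif/postprocessing.py | make_simple_contour
-- ===== SOURCE A (Python) =====
-- def make_simple_contour(points):
--     """
--     Make a simplified version of a contour by removing redundant points within
--     straight lines (i.e., each straight line segment will be reduced to contain
--     only the first and last point for that segment).  It is assumed that the
--     vectors between points are all one of the eight pixel neighbor directions.
--     This means that either one of the x- or y-direction must be zero, or if
--     both values are non-zero then they must be the same (i.e., [1,0], [0,2],
--     [2,2], and [3,3] are vall valid direction vectors, but [1,2] is not).
--     The input parameter of contour points must contain at least one point.
--
--     Parameters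
--     ----------
--     points : list
--         Contour of boundary points (x, y).
--
--     Returns
--     -------
--     list :
--         Simplified contour of boundary points (x, y).
--     """
--
--     # always keep first point
--     simple = [(points[0][0], points[0][1])]
--
--     # if only one point in contour, then done
--     if len(points) == 1:
--         return simple
--
--     # for all middle points (exclude first and last)
--     for i in range(1, len(points) - 1):
--         dx0 = points[i][0] - points[i-1][0]
--         dy0 = points[i][1] - points[i-1][1]
--         dx1 = points[i+1][0] - points[i][0]
--         dy1 = points[i+1][1] - points[i][1]
--         same_dx = (dx0 == dx1) or (dx0 > 0 and dx1 > 0) or (dx0 < 0 and dx1 < 0)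
--         same_dy = (dy0 == dy1) or (dy0 > 0 and dy1 > 0) or (dy0 < 0 and dy1 < 0)
--         if not same_dx or not same_dy:
--             simple.append((points[i][0], points[i][1]))
--
--     # for last point (calculate p[n]-p[n-1] and p[0]-p[n])
--     dx0 = points[-1][0] - points[-2][0]
--     dy0 = points[-1][1] - points[-2][1]
--     dx1 = points[0][0] - points[-1][0]
--     dy1 = points[0][1] - points[-1][1]
--     same_dx = (dx0 == dx1) or (dx0 > 0 and dx1 > 0) or (dx0 < 0 and dx1 < 0)
--     same_dy = (dy0 == dy1) or (dy0 > 0 and dy1 > 0) or (dy0 < 0 and dy1 < 0)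
--     if not same_dx or not same_dy:
--         simple.append((points[-1][0], points[-1][1]))
--
--     return simple
-- ===== SOURCE B (Python) =====
-- def make_simple_contour(points):
--     # Run-length-encoding rewrite: compress the circular sequence of normalized
--     # edge directions into maximal runs, then rebuild the simplified contour by
--     # emitting the point at the start of each run (prefix sums of run lengths).
--     def sign(v):
--         return (v > 0) - (v < 0)
--
--     n = len(points)
--     if n == 1:
--         return [(points[0][0], points[0][1])]
--
--     dirs = [(sign(points[(i + 1) % n][0] - points[i][0]),
--              sign(points[(i + 1) % n][1] - points[i][1])) for i in range(n)]
--
--     # stage 1: run-length encode dirs into (direction, length) runs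
--     runs = []
--     cur_dir, cur_len = dirs[0], 1
--     for d in dirs[1:]:
--         if d == cur_dir:
--             cur_len += 1
--         else:
--             runs.append((cur_dir, cur_len))
--             cur_dir, cur_len = d, 1
--     runs.append((cur_dir, cur_len))
--
--     # stage 2: each run contributes its starting point; advance by run length
--     simple, idx = [], 0
--     for _, length in runs:
--         simple.append((points[idx][0], points[idx][1]))
--         idx += length
--     return simple
-- ===== Notes on version B (the rewrite author's own statement) =====
-- stated objective: alternative
-- what changed: Instead of A's inline sign-comparison filter with a separate wraparound block for the last point, B run-length encodes the circular sequence of normalized edge directions into (direction, length) runs and then reconstructs the simplified contour by emitting the point at the start of each run via prefix sums of the run lengths.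
import Mathlib
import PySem

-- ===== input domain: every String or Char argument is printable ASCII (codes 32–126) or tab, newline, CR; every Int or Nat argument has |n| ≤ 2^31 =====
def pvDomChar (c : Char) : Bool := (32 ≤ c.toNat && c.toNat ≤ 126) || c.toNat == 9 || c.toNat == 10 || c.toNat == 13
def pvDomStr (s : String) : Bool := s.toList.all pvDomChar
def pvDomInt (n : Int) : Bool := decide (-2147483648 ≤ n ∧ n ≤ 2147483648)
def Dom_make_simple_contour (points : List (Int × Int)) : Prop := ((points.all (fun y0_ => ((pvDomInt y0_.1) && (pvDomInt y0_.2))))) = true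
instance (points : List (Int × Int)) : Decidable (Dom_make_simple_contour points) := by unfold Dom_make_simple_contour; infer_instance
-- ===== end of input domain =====

-- B replaces A's inline sign-comparison filter (with its separate wraparound block for the last
-- point) by a run-length encoding of the circular edge-direction sequence followed by a
-- reconstruction pass emitting each run's starting point (alternative decomposition, same cost).

-- ===== PORT A =====
-- points[i] (every index A uses is in range once points is nonempty, so the default is never read under Pre_)
def pyg (points : List (Int × Int)) (i : Int) : Int × Int := PySem.List.pyGetD points i (0, 0)

def make_simple_contour (points : List (Int × Int)) : List (Int × Int) :=
  let simple := [((pyg points 0).1, (pyg points 0).2)]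
  if points.length = 1 then simple
  else
    let simple := (PySem.List.pyRange 1 ((points.length : Int) - 1) 1).foldl
      (fun simple i =>
        let dx0 := (pyg points i).1 - (pyg points (i - 1)).1
        let dy0 := (pyg points i).2 - (pyg points (i - 1)).2
        let dx1 := (pyg points (i + 1)).1 - (pyg points i).1
        let dy1 := (pyg points (i + 1)).2 - (pyg points i).2
        let same_dx := (dx0 == dx1) || (decide (dx0 > 0) && decide (dx1 > 0)) || (decide (dx0 < 0) && decide (dx1 < 0))
        let same_dy := (dy0 == dy1) || (decide (dy0 > 0) && decide (dy1 > 0)) || (decide (dy0 < 0) && decide (dy1 < 0))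
        if !same_dx || !same_dy then simple ++ [((pyg points i).1, (pyg points i).2)] else simple)
      simple
    let dx0 := (pyg points (-1)).1 - (pyg points (-2)).1
    let dy0 := (pyg points (-1)).2 - (pyg points (-2)).2
    let dx1 := (pyg points 0).1 - (pyg points (-1)).1
    let dy1 := (pyg points 0).2 - (pyg points (-1)).2
    let same_dx := (dx0 == dx1) || (decide (dx0 > 0) && decide (dx1 > 0)) || (decide (dx0 < 0) && decide (dx1 < 0))
    let same_dy := (dy0 == dy1) || (decide (dy0 > 0) && decide (dy1 > 0)) || (decide (dy0 < 0) && decide (dy1 < 0))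
    if !same_dx || !same_dy then simple ++ [((pyg points (-1)).1, (pyg points (-1)).2)] else simple

-- ===== PORT B =====
-- (v > 0) - (v < 0)
def pysign (v : Int) : Int := (if v > 0 then (1 : Int) else 0) - (if v < 0 then (1 : Int) else 0)

-- body of B's dirs comprehension: normalized direction of the edge leaving index i
def edgeDir (points : List (Int × Int)) (n : Int) (i : Int) : Int × Int :=
  (pysign ((pyg points (PySem.Int.mod (i + 1) n)).1 - (pyg points i).1),
   pysign ((pyg points (PySem.Int.mod (i + 1) n)).2 - (pyg points i).2))

-- B's stage-1 loop body: extend the current run or close it and start a new one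
def rleStep (st : List ((Int × Int) × Int) × (Int × Int) × Int) (d : Int × Int) :
    List ((Int × Int) × Int) × (Int × Int) × Int :=
  if d = st.2.1 then (st.1, st.2.1, st.2.2 + 1) else (st.1 ++ [(st.2.1, st.2.2)], d, 1)

def make_simple_contour_alt (points : List (Int × Int)) : List (Int × Int) :=
  let n := points.length
  if n = 1 then [((pyg points 0).1, (pyg points 0).2)]
  else
    let dirs := (PySem.List.pyRange 0 (n : Int) 1).map (edgeDir points (n : Int))
    -- stage 1: run-length encode dirs (cur_dir = dirs[0], cur_len = 1, loop over dirs[1:])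
    let st := (PySem.List.slice dirs (some 1) none).foldl rleStep
      (([] : List ((Int × Int) × Int)), PySem.List.pyGetD dirs 0 (0, 0), (1 : Int))
    let runs := st.1 ++ [(st.2.1, st.2.2)]
    -- stage 2: emit the point at the start of each run, advancing idx by the run length
    (runs.foldl
      (fun p r => (p.1 ++ [((pyg points p.2).1, (pyg points p.2).2)], p.2 + r.2))
      (([] : List (Int × Int)), (0 : Int))).1

-- ===== PRECONDITION & SPEC =====
-- Pre_ excludes only the empty list, on which A raises IndexError (points[0]).
def Pre_make_simple_contour (points : List (Int × Int)) : Prop := points ≠ []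
instance (points : List (Int × Int)) : Decidable (Pre_make_simple_contour points) := by unfold Pre_make_simple_contour; infer_instance
def pvWitness_make_simple_contour : (List (Int × Int)) := [(0, 0), (1, 1), (2, 2)]

def Spec_make_simple_contour (points : List (Int × Int)) (out : List (Int × Int)) : Prop := out = make_simple_contour_alt points
instance (points : List (Int × Int)) (out : List (Int × Int)) : Decidable (Spec_make_simple_contour points out) := by unfold Spec_make_simple_contour; infer_instance

-- ===== CLAIM (what is proved, stated in full; the proofs are below) =====
def Claim_equal_make_simple_contour : Prop := ∀ (points : List (Int × Int)), Dom_make_simple_contour points → Pre_make_simple_contour points → Spec_make_simple_contour points (make_simple_contour points)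

-- ===== LEMMAS AND PROOFS =====

-- start indices of the runs, given the index where the first run starts
def startsOf : List ((Int × Int) × Int) → Int → List Int
  | [], _ => []
  | (_, l) :: rs, i => i :: startsOf rs (i + l)

-- positions where the direction changes, scanning ds at positions p, p+1, … with previous direction cd
def changes : List (Int × Int) → (Int × Int) → Int → List Int
  | [], _, _ => []
  | d :: ds, cd, p => if d = cd then changes ds cd (p + 1) else p :: changes ds d (p + 1)

lemma sameD_eq_sign (a b : Int) :
    ((a == b) || (decide (a > 0) && decide (b > 0)) || (decide (a < 0) && decide (b < 0)))
      = (pysign a == pysign b) := by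
  rw [Bool.eq_iff_iff]
  simp only [Bool.or_eq_true, Bool.and_eq_true, decide_eq_true_eq, beq_iff_eq]
  unfold pysign
  split_ifs <;> omega

lemma pair_pred (dx0 dy0 dx1 dy1 : Int) :
    (!((dx0 == dx1) || (decide (dx0 > 0) && decide (dx1 > 0)) || (decide (dx0 < 0) && decide (dx1 < 0))) ||
     !((dy0 == dy1) || (decide (dy0 > 0) && decide (dy1 > 0)) || (decide (dy0 < 0) && decide (dy1 < 0))))
      = decide ((pysign dx0, pysign dy0) ≠ (pysign dx1, pysign dy1)) := by
  rw [sameD_eq_sign, sameD_eq_sign]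
  rcases eq_or_ne (pysign dx0) (pysign dx1) with h1 | h1 <;>
    rcases eq_or_ne (pysign dy0) (pysign dy1) with h2 | h2 <;>
      simp [h1, h2, Prod.ext_iff]

lemma mod_small (a n : Int) (h0 : 0 ≤ a) (h1 : a < n) : PySem.Int.mod a n = a := by
  rw [PySem.Int.mod_eq_emod_of_pos (by omega)]
  exact Int.emod_eq_of_lt h0 h1

lemma mod_self_eq (n : Int) (h : 0 < n) : PySem.Int.mod n n = 0 := by
  rw [PySem.Int.mod_eq_emod_of_pos h]
  exact Int.emod_self

lemma pyg_neg_one (points : List (Int × Int)) (h : 2 ≤ points.length) :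
    pyg points (-1) = pyg points ((points.length : Int) - 1) := by
  unfold pyg
  rw [PySem.List.pyGetD_neg_ofNat points 1 (0, 0) (by omega) (by omega),
      PySem.List.pyGetD_eq_getElem points (0, 0) (by omega) (by omega)]
  congr 1
  omega

lemma pyg_neg_two (points : List (Int × Int)) (h : 2 ≤ points.length) :
    pyg points (-2) = pyg points ((points.length : Int) - 2) := by
  unfold pyg
  rw [PySem.List.pyGetD_neg_ofNat points 2 (0, 0) (by omega) (by omega),
      PySem.List.pyGetD_eq_getElem points (0, 0) (by omega) (by omega)]
  congr 1
  omega

lemma hAfil (points : List (Int × Int)) :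
    List.filter
      (fun i =>
        !((pyg points i).1 - (pyg points (i - 1)).1 == (pyg points (i + 1)).1 - (pyg points i).1 ||
            (decide ((pyg points i).1 - (pyg points (i - 1)).1 > 0) && decide ((pyg points (i + 1)).1 - (pyg points i).1 > 0)) ||
            (decide ((pyg points i).1 - (pyg points (i - 1)).1 < 0) && decide ((pyg points (i + 1)).1 - (pyg points i).1 < 0))) ||
        !((pyg points i).2 - (pyg points (i - 1)).2 == (pyg points (i + 1)).2 - (pyg points i).2 ||
            (decide ((pyg points i).2 - (pyg points (i - 1)).2 > 0) && decide ((pyg points (i + 1)).2 - (pyg points i).2 > 0)) ||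
            (decide ((pyg points i).2 - (pyg points (i - 1)).2 < 0) && decide ((pyg points (i + 1)).2 - (pyg points i).2 < 0))))
      (PySem.List.pyRange 1 ((points.length : Int) - 1) 1)
      = List.filter
          (fun i => decide (edgeDir points (points.length : Int) (i - 1) ≠ edgeDir points (points.length : Int) i))
          (PySem.List.pyRange 1 ((points.length : Int) - 1) 1) := by
  apply List.filter_congr
  intro i hi
  obtain ⟨hi1, hi2⟩ := PySem.List.mem_pyRange_one.mp hi
  simp only [pair_pred, edgeDir]
  simp only [show i - 1 + 1 = i from by ring]
  simp only [mod_small i ((points.length : Int)) (by omega) (by omega),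
             mod_small (i + 1) ((points.length : Int)) (by omega) (by omega)]

lemma last_pred (points : List (Int × Int)) (h : 2 ≤ points.length) :
    (!((pyg points (-1)).1 - (pyg points (-2)).1 == (pyg points 0).1 - (pyg points (-1)).1 ||
        (decide ((pyg points (-1)).1 - (pyg points (-2)).1 > 0) && decide ((pyg points 0).1 - (pyg points (-1)).1 > 0)) ||
        (decide ((pyg points (-1)).1 - (pyg points (-2)).1 < 0) && decide ((pyg points 0).1 - (pyg points (-1)).1 < 0))) ||
     !((pyg points (-1)).2 - (pyg points (-2)).2 == (pyg points 0).2 - (pyg points (-1)).2 ||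
        (decide ((pyg points (-1)).2 - (pyg points (-2)).2 > 0) && decide ((pyg points 0).2 - (pyg points (-1)).2 > 0)) ||
        (decide ((pyg points (-1)).2 - (pyg points (-2)).2 < 0) && decide ((pyg points 0).2 - (pyg points (-1)).2 < 0))))
      = decide (edgeDir points (points.length : Int) ((points.length : Int) - 1 - 1) ≠ edgeDir points (points.length : Int) ((points.length : Int) - 1)) := by
  rw [pyg_neg_one points h, pyg_neg_two points h]
  simp only [pair_pred, edgeDir]
  simp only [show (points.length : Int) - 1 - 1 + 1 = (points.length : Int) - 1 from by ring]
  simp only [show (points.length : Int) - 1 + 1 = (points.length : Int) from by ring]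
  simp only [mod_small ((points.length : Int) - 1) ((points.length : Int)) (by omega) (by omega),
             mod_self_eq ((points.length : Int)) (by omega)]
  simp only [show (points.length : Int) - 1 - 1 = (points.length : Int) - 2 from by ring]

lemma range_split (points : List (Int × Int)) (h : 2 ≤ points.length) :
    PySem.List.pyRange 1 ((points.length : Int)) 1
      = PySem.List.pyRange 1 ((points.length : Int) - 1) 1 ++ [(points.length : Int) - 1] := by
  have hx := PySem.List.pyRange_one_succ_right (a := 1) (b := (points.length : Int) - 1) (by omega)
  rw [show (points.length : Int) - 1 + 1 = (points.length : Int) from by ring] at hx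
  exact hx

-- A (for n ≥ 2) equals the canonical form: first point, then points where the circular direction changes
lemma A_char (points : List (Int × Int)) (h : 2 ≤ points.length) :
    make_simple_contour points
      = [((pyg points 0).1, (pyg points 0).2)] ++
        (List.filter
          (fun i => decide (edgeDir points (points.length : Int) (i - 1) ≠ edgeDir points (points.length : Int) i))
          (PySem.List.pyRange 1 ((points.length : Int)) 1)).map
          (fun i => ((pyg points i).1, (pyg points i).2)) := by
  have h1 : points.length ≠ 1 := by omega
  simp only [make_simple_contour, if_neg h1]
  rw [PySem.List.foldl_append_if]
  rw [hAfil points]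
  simp only [last_pred points h, decide_eq_true_eq]
  rw [pyg_neg_one points h]
  rw [range_split points h, List.filter_append, List.map_append]
  simp only [List.filter_cons, List.filter_nil, decide_eq_true_eq]
  by_cases hq : edgeDir points (points.length : Int) ((points.length : Int) - 1 - 1)
                  ≠ edgeDir points (points.length : Int) ((points.length : Int) - 1)
  · simp [hq]
  · rw [not_not] at hq
    simp [hq]

-- stage-2 reconstruction: the fold emits exactly the points at the run-start indices
lemma recon_eq (points : List (Int × Int)) :
    ∀ (runs : List ((Int × Int) × Int)) (acc : List (Int × Int)) (idx : Int),
    (runs.foldl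
      (fun p r => (p.1 ++ [((pyg points p.2).1, (pyg points p.2).2)], p.2 + r.2))
      (acc, idx)).1
      = acc ++ (startsOf runs idx).map (fun i => ((pyg points i).1, (pyg points i).2)) := by
  intro runs
  induction runs with
  | nil => intro acc idx; simp [startsOf]
  | cons r rs ih =>
    intro acc idx
    obtain ⟨d, l⟩ := r
    simp only [List.foldl_cons, startsOf, List.map_cons]
    rw [ih]
    simp

-- the run accumulator only grows by appending: factor it out of the fold
lemma rle_acc :
    ∀ (ds : List (Int × Int)) (acc : List ((Int × Int) × Int)) (cd : Int × Int) (cl : Int),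
    ds.foldl rleStep (acc, cd, cl)
      = (acc ++ (ds.foldl rleStep ([], cd, cl)).1, (ds.foldl rleStep ([], cd, cl)).2) := by
  intro ds
  induction ds with
  | nil => intro acc cd cl; simp
  | cons d ds ih =>
    intro acc cd cl
    simp only [List.foldl_cons, rleStep, List.nil_append]
    by_cases hd : d = cd
    · simp only [if_pos hd]
      exact ih acc cd (cl + 1)
    · simp only [if_neg hd]
      rw [ih (acc ++ [(cd, cl)]) d 1, ih [(cd, cl)] d 1]
      simp

-- run starts of the RLE result = first position, then the change positions
lemma rle_changes :
    ∀ (ds : List (Int × Int)) (cd : Int × Int) (cl : Int) (b : Int),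
    startsOf ((ds.foldl rleStep ([], cd, cl)).1 ++
        [((ds.foldl rleStep ([], cd, cl)).2.1, (ds.foldl rleStep ([], cd, cl)).2.2)]) b
      = b :: changes ds cd (b + cl) := by
  intro ds
  induction ds with
  | nil => intro cd cl b; simp [startsOf, changes]
  | cons d ds ih =>
    intro cd cl b
    simp only [List.foldl_cons, rleStep, changes, List.nil_append]
    by_cases hd : d = cd
    · simp only [if_pos hd]
      rw [ih cd (cl + 1) b]
      congr 2
      ring
    · simp only [if_neg hd]
      rw [rle_acc ds [(cd, cl)] d 1]
      simp only [List.cons_append, List.nil_append, startsOf]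
      rw [ih d 1 (b + cl)]

-- change positions over a mapped range = filter of the range by "direction differs from predecessor"
lemma changes_filter (f : Int → Int × Int) :
    ∀ (k : Nat) (a : Int),
    changes ((PySem.List.pyRange a (a + (k : Int)) 1).map f) (f (a - 1)) a
      = List.filter (fun i => decide (f (i - 1) ≠ f i)) (PySem.List.pyRange a (a + (k : Int)) 1) := by
  intro k
  induction k with
  | zero =>
    intro a
    simp only [Nat.cast_zero, add_zero]
    rw [PySem.List.pyRange_one_eq_nil (le_refl a)]
    simp [changes]
  | succ k ih =>
    intro a
    simp only [Nat.cast_add, Nat.cast_one]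
    rw [show a + ((k : Int) + 1) = (a + 1) + (k : Int) from by ring]
    rw [PySem.List.pyRange_one_cons (by omega : a < (a + 1) + (k : Int))]
    simp only [List.map_cons, changes, List.filter_cons]
    have ih' := ih (a + 1)
    rw [show (a + 1) - 1 = a from by ring] at ih'
    by_cases hd : f a = f (a - 1)
    · simp only [← hd]
      simp [ih']
    · rw [if_neg hd, ih']
      have hdec : decide (f (a - 1) ≠ f a) = true := by
        simp only [decide_eq_true_eq]
        exact fun hx => hd hx.symm
      simp [hdec]

-- B (for n ≥ 2) equals the same canonical form
lemma B_char (points : List (Int × Int)) (h : 2 ≤ points.length) :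
    make_simple_contour_alt points
      = [((pyg points 0).1, (pyg points 0).2)] ++
        (List.filter
          (fun i => decide (edgeDir points (points.length : Int) (i - 1) ≠ edgeDir points (points.length : Int) i))
          (PySem.List.pyRange 1 ((points.length : Int)) 1)).map
          (fun i => ((pyg points i).1, (pyg points i).2)) := by
  have h1 : points.length ≠ 1 := by omega
  simp only [make_simple_contour_alt, if_neg h1]
  rw [PySem.List.slice_from_one]
  have hcons : PySem.List.pyRange 0 ((points.length : Int)) 1
      = 0 :: PySem.List.pyRange 1 ((points.length : Int)) 1 := by
    have := PySem.List.pyRange_one_cons (a := 0) (b := (points.length : Int)) (by omega)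
    simpa using this
  rw [hcons]
  simp only [List.map_cons, List.tail_cons]
  have hd0 : PySem.List.pyGetD
      (edgeDir points ((points.length : Int)) 0 :: (PySem.List.pyRange 1 ((points.length : Int)) 1).map (edgeDir points ((points.length : Int)))) 0 (0, 0)
      = edgeDir points ((points.length : Int)) 0 := by
    simp [PySem.List.pyGetD, PySem.List.pyIdx?, PySem.List.pyGet?]
  rw [hd0]
  rw [recon_eq points _ [] 0, rle_changes]
  have hk : ∃ k : Nat, (points.length : Int) = 1 + (k : Int) := ⟨points.length - 1, by omega⟩
  obtain ⟨k, hkeq⟩ := hk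
  have hcf := changes_filter (edgeDir points ((points.length : Int))) k 1
  rw [← hkeq] at hcf
  rw [show (1 : Int) - 1 = 0 from by ring] at hcf
  rw [show (0 : Int) + 1 = 1 from by ring, hcf]
  simp

-- ===== VERDICT (by name: the statement is the Claim_ definition above) =====
theorem make_simple_contour_spec : Claim_equal_make_simple_contour := by
  intro points hdom hpre
  unfold Spec_make_simple_contour
  by_cases h1 : points.length = 1
  · simp [make_simple_contour, make_simple_contour_alt, h1]
  · have hn2 : 2 ≤ points.length := by
      have h0 : points.length ≠ 0 := fun hh => hpre (List.length_eq_zero_iff.mp hh)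
      omega
    rw [A_char points hn2, B_char points hn2]
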